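-- pv_equiv track=rewrite | github.com/Baek-soo/Python-Practice | 2. Codingtest/1. Weekly test 1.py | solution
-- ===== SOURCE A (Python) =====
-- def solution(price, money, count):
--     using_time = 1
--     new_price = 0
--     for using_time in range(using_time, count+1):
--         if using_time < count:
--             new_price += price
--             money = money - new_price
--             using_time += 1
--     return count*price - money
-- ===== SOURCE B (Python) =====
-- def solution(price, money, count):
--     n = max(count - 1, 0)
--     return count * price - money + price * (n * (n + 1) // 2)
-- ===== Notes on version B (the rewrite author's own statement) =====
-- stated objective: faster
-- what changed: replaced the O(count) loop that repeatedly subtracts a growing price from money with the closed-form Gauss sum count*price - money + price*(n*(n+1)//2) with n = max(count-1, 0)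
import Mathlib
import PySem

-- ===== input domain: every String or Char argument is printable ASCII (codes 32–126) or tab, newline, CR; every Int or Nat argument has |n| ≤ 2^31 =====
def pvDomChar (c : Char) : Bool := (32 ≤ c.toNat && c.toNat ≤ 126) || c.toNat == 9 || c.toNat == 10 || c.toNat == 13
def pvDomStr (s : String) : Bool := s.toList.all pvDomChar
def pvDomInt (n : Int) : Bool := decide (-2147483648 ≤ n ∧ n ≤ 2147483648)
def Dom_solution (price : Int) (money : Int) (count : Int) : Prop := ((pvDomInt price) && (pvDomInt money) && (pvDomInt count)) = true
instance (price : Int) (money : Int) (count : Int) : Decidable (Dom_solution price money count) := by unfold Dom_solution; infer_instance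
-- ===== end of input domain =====

-- B replaces A's O(count) accumulation loop with the closed-form Gauss sum (faster: O(1)).

-- ===== PORT A =====
-- loop state: (new_price, money); the loop variable's inner 'using_time += 1' has no effect on the range
def solution (price : Int) (money : Int) (count : Int) : Int :=
  let st := (PySem.List.pyRange 1 (count + 1) 1).foldl
    (fun (s : Int × Int) using_time =>
      if using_time < count then (s.1 + price, s.2 - (s.1 + price)) else s)
    (0, money)
  count * price - st.2

-- ===== PORT B =====
def solution_alt (price : Int) (money : Int) (count : Int) : Int :=
  let n := max (count - 1) 0
  count * price - money + price * (PySem.Int.floordiv (n * (n + 1)) 2)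

-- ===== PRECONDITION & SPEC =====
def Spec_solution (price : Int) (money : Int) (count : Int) (out : Int) : Prop := out = solution_alt price money count
instance (price : Int) (money : Int) (count : Int) (out : Int) : Decidable (Spec_solution price money count out) := by unfold Spec_solution; infer_instance

-- ===== CLAIM (what is proved, stated in full; the proofs are below) =====
def Claim_equal_solution : Prop := ∀ (price : Int) (money : Int) (count : Int), Dom_solution price money count → Spec_solution price money count (solution price money count)

-- ===== LEMMAS AND PROOFS =====

-- triangle numbers, recursively
def pvTri : Nat → Nat
  | 0 => 0
  | n + 1 => pvTri n + (n + 1)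

theorem pvTri_gauss (n : Nat) : 2 * pvTri n = n * (n + 1) := by
  induction n with
  | zero => rfl
  | succ k ih =>
    show 2 * (pvTri k + (k + 1)) = (k + 1) * (k + 2)
    rw [Nat.mul_add, ih]; ring

-- the loop body, once all iterations are known to take the 'if' branch
theorem pv_foldl_uncond (price : Int) (l : List Int) (np m : Int) :
    l.foldl (fun (s : Int × Int) _ => (s.1 + price, s.2 - (s.1 + price))) (np, m)
      = (np + l.length * price,
         m - l.length * np - price * (pvTri l.length : Nat)) := by
  induction l generalizing np m with
  | nil => simp [pvTri]
  | cons x xs ih =>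
    simp only [List.foldl_cons, ih, List.length_cons, Prod.mk.injEq]
    constructor
    · push_cast; ring
    · have h2 : (pvTri (xs.length + 1) : Int) = (pvTri xs.length : Int) + xs.length + 1 := by
        simp [pvTri]; ring
      rw [h2]; push_cast; ring

theorem pv_solution_closed (price money count : Int) :
    solution price money count
      = count * price - money + price * (pvTri (count - 1).toNat : Nat) := by
  unfold solution
  by_cases h : count ≤ 0
  · rw [PySem.List.pyRange_one_eq_nil (by omega)]
    have h0 : (count - 1).toNat = 0 := by omega
    simp [h0, pvTri]
  · -- count ≥ 1: split the range at count; the last element takes the else branch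
    rw [PySem.List.pyRange_one_append 1 count (count + 1) (by omega) (by omega),
        PySem.List.pyRange_one_singleton]
    rw [List.foldl_append]
    have hcong := PySem.List.foldl_congr_mem
      (l := PySem.List.pyRange 1 count 1)
      (f := fun (s : Int × Int) using_time =>
        if using_time < count then (s.1 + price, s.2 - (s.1 + price)) else s)
      (g := fun (s : Int × Int) _ => (s.1 + price, s.2 - (s.1 + price)))
      (init := ((0 : Int), money))
      (by intro acc x hx
          have := (PySem.List.mem_pyRange_one.mp hx).2
          simp [this])
    rw [hcong, pv_foldl_uncond, PySem.List.length_pyRange_one]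
    simp only [List.foldl_cons, List.foldl_nil, if_neg (lt_irrefl count)]
    ring

theorem pv_tri_floordiv (c : Int) :
    (pvTri (c - 1).toNat : Int) = PySem.Int.floordiv (max (c - 1) 0 * (max (c - 1) 0 + 1)) 2 := by
  set n : Nat := (c - 1).toNat with hn
  have hmax : max (c - 1) 0 = (n : Int) := by omega
  rw [hmax]
  have : (n : Int) * ((n : Int) + 1) = ((n * (n + 1) : Nat) : Int) := by push_cast; ring
  rw [this]
  rw [show ((2 : Int)) = ((2 : Nat) : Int) from rfl, PySem.Int.floordiv_natCast]
  have := pvTri_gauss n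
  omega

-- ===== VERDICT (by name: the statement is the Claim_ definition above) =====
theorem solution_spec : Claim_equal_solution := by
  intro price money count _
  show solution price money count = solution_alt price money count
  rw [pv_solution_closed, solution_alt, pv_tri_floordiv]
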